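-- pv_equiv track=rewrite | github.com/taogoldi/reverse-engineer | downloads/chrysalis/scripts/emulate_logwrite_dump_shellcode.py | op_str_has_seg_reg
-- ===== SOURCE A (Python) =====
-- def op_str_has_seg_reg(op_str: str) -> bool:
--     s = (op_str or "").lower().replace(" ", "")
--     # Match things like: "ds,edi" or "es:[edi],dx" or "movds,ax" (capstone formats vary)
--     for seg in ("ds", "es", "ss", "cs", "fs", "gs"):
--         if s.startswith(seg + ","):
--             return True
--         if (seg + ":[") in s:
--             return True
--     return False
-- ===== SOURCE B (Python) =====
-- def op_str_has_seg_reg(op_str: str) -> bool: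
--     # One-pass character window scan instead of six startswith/substring searches.
--     s = (op_str or "").lower().replace(" ", "")
--     first = "descfg"  # first letters of ds, es, ss, cs, fs, gs
--     if len(s) >= 3 and s[0] in first and s[1] == "s" and s[2] == ",":
--         return True
--     for i in range(len(s) - 3):
--         if s[i] in first and s[i + 1] == "s" and s[i + 2] == ":" and s[i + 3] == "[":
--             return True
--     return False
-- ===== Notes on version B (the rewrite author's own statement) =====
-- stated objective: alternative
-- what changed: B replaces A's loop over six register names (each doing a startswith and a substring search over the whole string) by one 3-char prefix test plus a single sliding 4-character window scan over the normalized string.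
import Mathlib
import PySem

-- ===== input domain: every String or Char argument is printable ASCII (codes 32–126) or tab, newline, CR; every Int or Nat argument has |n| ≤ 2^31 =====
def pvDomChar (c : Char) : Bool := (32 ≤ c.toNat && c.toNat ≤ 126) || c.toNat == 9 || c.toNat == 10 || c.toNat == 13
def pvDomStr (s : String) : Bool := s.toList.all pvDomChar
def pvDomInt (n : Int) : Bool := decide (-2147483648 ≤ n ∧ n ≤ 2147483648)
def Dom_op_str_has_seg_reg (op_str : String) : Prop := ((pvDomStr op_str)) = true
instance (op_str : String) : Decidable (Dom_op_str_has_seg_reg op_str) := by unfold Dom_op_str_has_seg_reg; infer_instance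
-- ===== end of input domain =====

-- B replaces A's six startswith/substring searches by one prefix test plus a single
-- sliding four-character window scan over the normalized string (objective: alternative).

-- ===== PORT A =====
-- A's for-loop over the six segment names; each early 'return True' is an if-branch.
def segLoopA (s : String) : List String → Bool
  | [] => false
  | seg :: rest =>
    if PySem.Str.startswith s (seg ++ ",") then true
    else if PySem.Str.isIn (seg ++ ":[") s then true
    else segLoopA s rest

def op_str_has_seg_reg (op_str : String) : Bool :=
  let s := PySem.Str.replace (PySem.Str.lower op_str) " " ""
  segLoopA s ["ds", "es", "ss", "cs", "fs", "gs"]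

-- ===== PORT B =====
-- `c in "descfg"` from Source B
def segFirst (c : Char) : Bool :=
  c == 'd' || c == 'e' || c == 's' || c == 'c' || c == 'f' || c == 'g'

-- Source B's `len(s) >= 3 and s[0] in first and s[1] == "s" and s[2] == ","`
def segPrefixB (t : List Char) : Bool :=
  match t with
  | c1 :: c2 :: c3 :: _ => segFirst c1 && c2 == 's' && c3 == ','
  | _ => false

-- Source B's index loop over windows s[i..i+3]
def segScanB : List Char → Bool
  | c1 :: c2 :: c3 :: c4 :: rest =>
    (segFirst c1 && c2 == 's' && c3 == ':' && c4 == '[') || segScanB (c2 :: c3 :: c4 :: rest)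
  | _ => false

def op_str_has_seg_reg_alt (op_str : String) : Bool :=
  let t := (PySem.Str.replace (PySem.Str.lower op_str) " " "").toList
  segPrefixB t || segScanB t

-- ===== PRECONDITION & SPEC =====
def Spec_op_str_has_seg_reg (op_str : String) (out : Bool) : Prop := out = op_str_has_seg_reg_alt op_str
instance (op_str : String) (out : Bool) : Decidable (Spec_op_str_has_seg_reg op_str out) := by unfold Spec_op_str_has_seg_reg; infer_instance

-- ===== CLAIM (what is proved, stated in full; the proofs are below) =====
def Claim_equal_op_str_has_seg_reg : Prop := ∀ (op_str : String), Dom_op_str_has_seg_reg op_str → Spec_op_str_has_seg_reg op_str (op_str_has_seg_reg op_str)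

-- ===== LEMMAS AND PROOFS =====

lemma segPrefixB_iff (t : List Char) :
    segPrefixB t = true ↔
      (['d','s',','] <+: t ∨ ['e','s',','] <+: t ∨ ['s','s',','] <+: t ∨
       ['c','s',','] <+: t ∨ ['f','s',','] <+: t ∨ ['g','s',','] <+: t) := by
  match t with
  | [] => simp [segPrefixB]
  | [c1] => simp [segPrefixB, List.cons_prefix_cons]
  | [c1, c2] => simp [segPrefixB, List.cons_prefix_cons]
  | c1 :: c2 :: c3 :: r =>
    simp only [segPrefixB, segFirst, List.cons_prefix_cons, List.nil_prefix, and_true,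
      Bool.and_eq_true, Bool.or_eq_true, beq_iff_eq]
    constructor
    · rintro ⟨⟨h1, h2⟩, h3⟩
      subst h2; subst h3
      rcases h1 with ((((h1 | h1) | h1) | h1) | h1) | h1 <;> subst h1 <;> simp
    · rintro (⟨h1, h2, h3⟩ | ⟨h1, h2, h3⟩ | ⟨h1, h2, h3⟩ | ⟨h1, h2, h3⟩ | ⟨h1, h2, h3⟩ | ⟨h1, h2, h3⟩) <;>
        subst h1 <;> subst h2 <;> subst h3 <;> simp

lemma segScanB_iff (t : List Char) :
    segScanB t = true ↔
      (['d','s',':','['] <:+: t ∨ ['e','s',':','['] <:+: t ∨ ['s','s',':','['] <:+: t ∨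
       ['c','s',':','['] <:+: t ∨ ['f','s',':','['] <:+: t ∨ ['g','s',':','['] <:+: t) := by
  induction t with
  | nil => simp [segScanB]
  | cons c1 t ih =>
    cases t with
    | nil =>
      constructor
      · intro h; simp [segScanB] at h
      · rintro (h | h | h | h | h | h) <;> · have := h.length_le; simp at this
    | cons c2 t =>
      cases t with
      | nil =>
        constructor
        · intro h; simp [segScanB] at h
        · rintro (h | h | h | h | h | h) <;> · have := h.length_le; simp at this
      | cons c3 t =>
        cases t with
        | nil =>
          constructor
          · intro h; simp [segScanB] at h
          · rintro (h | h | h | h | h | h) <;> · have := h.length_le; simp at this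
        | cons c4 r =>
          simp only [segScanB, Bool.or_eq_true, ih, List.infix_cons_iff (a := c1)]
          simp only [segFirst, List.cons_prefix_cons, List.nil_prefix, and_true,
            Bool.and_eq_true, Bool.or_eq_true, beq_iff_eq]
          constructor
          · rintro (⟨⟨⟨h1, h2⟩, h3⟩, h4⟩ | h)
            · subst h2; subst h3; subst h4
              rcases h1 with ((((h1 | h1) | h1) | h1) | h1) | h1 <;> subst h1 <;> simp
            · rcases h with h | h | h | h | h | h
              · exact Or.inl (Or.inr h)
              · exact Or.inr (Or.inl (Or.inr h))
              · exact Or.inr (Or.inr (Or.inl (Or.inr h)))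
              · exact Or.inr (Or.inr (Or.inr (Or.inl (Or.inr h))))
              · exact Or.inr (Or.inr (Or.inr (Or.inr (Or.inl (Or.inr h)))))
              · exact Or.inr (Or.inr (Or.inr (Or.inr (Or.inr (Or.inr h)))))
          · rintro (h | h | h | h | h | h) <;> rcases h with ⟨h1, h2, h3, h4⟩ | h <;>
              first
              | (subst h1; subst h2; subst h3; subst h4; left; simp)
              | (right; tauto)

lemma toListDsComma : ("ds" ++ ",").toList = ['d','s',','] := by decide
lemma toListEsComma : ("es" ++ ",").toList = ['e','s',','] := by decide
lemma toListSsComma : ("ss" ++ ",").toList = ['s','s',','] := by decide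
lemma toListCsComma : ("cs" ++ ",").toList = ['c','s',','] := by decide
lemma toListFsComma : ("fs" ++ ",").toList = ['f','s',','] := by decide
lemma toListGsComma : ("gs" ++ ",").toList = ['g','s',','] := by decide
lemma toListDsBr : ("ds" ++ ":[").toList = ['d','s',':','['] := by decide
lemma toListEsBr : ("es" ++ ":[").toList = ['e','s',':','['] := by decide
lemma toListSsBr : ("ss" ++ ":[").toList = ['s','s',':','['] := by decide
lemma toListCsBr : ("cs" ++ ":[").toList = ['c','s',':','['] := by decide
lemma toListFsBr : ("fs" ++ ":[").toList = ['f','s',':','['] := by decide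
lemma toListGsBr : ("gs" ++ ":[").toList = ['g','s',':','['] := by decide

lemma segLoopA_eq (s : String) :
    segLoopA s ["ds", "es", "ss", "cs", "fs", "gs"] = (segPrefixB s.toList || segScanB s.toList) := by
  rw [Bool.eq_iff_iff]
  simp only [segLoopA, Bool.if_true_left, Bool.or_eq_true, PySem.Str.startswith_eq,
    PySem.Str.isIn_eq, PySem.Chars.startswith_iff, PySem.Chars.isIn_iff_infix,
    toListDsComma, toListEsComma, toListSsComma, toListCsComma, toListFsComma, toListGsComma,
    toListDsBr, toListEsBr, toListSsBr, toListCsBr, toListFsBr, toListGsBr,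
    decide_eq_true_iff, Bool.false_eq_true, or_false]
  rw [segPrefixB_iff, segScanB_iff]
  tauto

-- ===== VERDICT (by name: the statement is the Claim_ definition above) =====
theorem op_str_has_seg_reg_spec : Claim_equal_op_str_has_seg_reg := by
  intro op_str _
  unfold Spec_op_str_has_seg_reg op_str_has_seg_reg op_str_has_seg_reg_alt
  exact segLoopA_eq _
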